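-- pv_equiv track=rewrite | github.com/Rea11u/InPass | inpass.py | atbash_cipher_encrypt
-- ===== SOURCE A (Python) =====
-- def atbash_cipher_encrypt(text):
--     encrypted = ""
--     for char in text:
--         if char.isalpha():
--             shift_base = 65 if char.isupper() else 97
--             encrypted += chr(shift_base + (25 - (ord(char) - shift_base)))
--         else:
--             encrypted += char
--     return encrypted
-- ===== SOURCE B (Python) =====
-- # Atbash via a precomputed translation table: one text.translate call instead of a per-char branch loop.
-- _LOW = "abcdefghijklmnopqrstuvwxyz"
-- _UP = _LOW.upper()
-- _TABLE = str.maketrans(_UP + _LOW, _UP[::-1] + _LOW[::-1])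
--
--
-- def atbash_cipher_encrypt(text):
--     return text.translate(_TABLE)
-- ===== Notes on version B (the rewrite author's own statement) =====
-- stated objective: faster
-- what changed: Replaces the per-character isalpha/isupper branch-and-concatenate loop with a translation table built once via str.maketrans and a single text.translate call.
import Mathlib
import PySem

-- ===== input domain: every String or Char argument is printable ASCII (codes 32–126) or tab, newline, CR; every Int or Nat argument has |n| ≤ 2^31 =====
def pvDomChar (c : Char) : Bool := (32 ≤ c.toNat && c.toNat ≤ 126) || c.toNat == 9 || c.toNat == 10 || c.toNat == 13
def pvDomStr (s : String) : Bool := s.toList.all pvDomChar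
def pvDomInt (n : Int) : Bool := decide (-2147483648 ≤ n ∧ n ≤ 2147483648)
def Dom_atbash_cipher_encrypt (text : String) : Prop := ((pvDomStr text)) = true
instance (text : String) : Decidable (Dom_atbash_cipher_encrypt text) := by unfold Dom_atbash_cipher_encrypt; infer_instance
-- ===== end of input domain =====

-- B builds a fixed Atbash translation table once and maps the text through it in one pass,
-- replacing A's per-character isalpha/isupper branch-and-concatenate loop (measured faster in a timing run).

-- ===== PORT A =====
-- encrypted = ""; for char in text: if char.isalpha(): ... += chr(shift_base + (25 - (ord(char) - shift_base))) else: ... += char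
def atbash_cipher_encrypt (text : String) : String :=
  String.ofList (text.toList.foldl (fun encrypted c =>
    if PySem.Chars.isalpha c then
      let shiftBase : Int := if PySem.Chars.isupper c then 65 else 97
      encrypted ++ [Char.ofNat (shiftBase + (25 - ((c.toNat : Int) - shiftBase))).toNat]
    else
      encrypted ++ [c]) [])

-- ===== PORT B =====
def pvLow : List Char := "abcdefghijklmnopqrstuvwxyz".toList
def pvUp : List Char := PySem.Chars.upper pvLow
-- _TABLE = str.maketrans(_UP + _LOW, _UP[::-1] + _LOW[::-1])
def pvTable : PySem.Dict Char Char :=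
  PySem.Dict.ofList ((pvUp ++ pvLow).zip (pvUp.reverse ++ pvLow.reverse))

-- text.translate(_TABLE): each char replaced by its table image, unmapped chars unchanged
def atbash_cipher_encrypt_alt (text : String) : String :=
  String.ofList (text.toList.map (fun c => PySem.Dict.getD pvTable c c))

-- ===== PRECONDITION & SPEC =====
def Spec_atbash_cipher_encrypt (text : String) (out : String) : Prop := out = atbash_cipher_encrypt_alt text
instance (text : String) (out : String) : Decidable (Spec_atbash_cipher_encrypt text out) := by unfold Spec_atbash_cipher_encrypt; infer_instance

-- ===== CLAIM (what is proved, stated in full; the proofs are below) =====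
def Claim_equal_atbash_cipher_encrypt : Prop := ∀ (text : String), Dom_atbash_cipher_encrypt text → Spec_atbash_cipher_encrypt text (atbash_cipher_encrypt text)

-- ===== LEMMAS AND PROOFS =====

-- A's per-character step, named for the pointwise comparison
def pvStepA (c : Char) : Char :=
  if PySem.Chars.isalpha c then
    let shiftBase : Int := if PySem.Chars.isupper c then 65 else 97
    Char.ofNat (shiftBase + (25 - ((c.toNat : Int) - shiftBase))).toNat
  else c

-- pointwise agreement on every domain character, checked by evaluation over codes < 128
set_option maxRecDepth 16384 in
theorem pvStep_eq (c : Char) (h : pvDomChar c = true) :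
    pvStepA c = PySem.Dict.getD pvTable c c := by
  have hlt : c.toNat < 128 := by
    simp only [pvDomChar, Bool.or_eq_true, Bool.and_eq_true, decide_eq_true_eq, beq_iff_eq] at h
    omega
  have hall : ∀ n : Fin 128, pvStepA (Char.ofNat n) = PySem.Dict.getD pvTable (Char.ofNat n) (Char.ofNat n) := by decide
  have hc : Char.ofNat c.toNat = c := Char.ofNat_toNat c
  have := hall ⟨c.toNat, hlt⟩
  simpa [hc] using this

set_option maxRecDepth 16384 in
theorem atbash_cipher_encrypt_spec : Claim_equal_atbash_cipher_encrypt := by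
  intro text hdom
  unfold Spec_atbash_cipher_encrypt atbash_cipher_encrypt atbash_cipher_encrypt_alt
  have hfun : (fun (encrypted : List Char) c =>
      if PySem.Chars.isalpha c then
        let shiftBase : Int := if PySem.Chars.isupper c then 65 else 97
        encrypted ++ [Char.ofNat (shiftBase + (25 - ((c.toNat : Int) - shiftBase))).toNat]
      else
        encrypted ++ [c]) = (fun acc c => acc ++ [pvStepA c]) := by
    funext acc c
    simp only [pvStepA]
    split_ifs <;> rfl
  rw [hfun, PySem.List.foldl_append_singleton_eq_map, List.nil_append]
  congr 1
  apply List.map_congr_left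
  intro c hc
  exact pvStep_eq c (by
    have : List.all text.toList pvDomChar = true := hdom
    exact List.all_eq_true.mp this c hc)
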